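-- pv_equiv track=rewrite | github.com/ganadipa/manajerial-candi | Helper.py | custom_ord
-- ===== SOURCE A (Python) =====
-- def custom_ord(k: str) -> int:
--     alphanumeric = ['0','1','2','3','4','5','6','7','8', '9',
--                     'A','B','C','D','E', 'F', 'G', 'H', 'I', 'J', 'K', 'L', 'M',
--                     'N','O','P','Q','R', 'S', 'T', 'U', 'V', 'W', 'X', 'Y', 'Z',
--
--                     'a','b','c','d','e', 'f', 'g', 'h', 'i', 'j', 'k', 'l', 'm',
--                     'n','o','p','q','r', 's', 't', 'u', 'v', 'w', 'x', 'y', 'z',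
--                     ''
--                     ]
--     returnVal = [48, 49, 50, 51, 52, 53, 54, 55, 56, 57,
--            65, 66, 67, 68, 69, 70, 71, 72, 73, 74, 75, 76, 77,
--            78, 79, 80, 81, 82, 83, 84, 85, 86, 87, 88, 89, 90,
--
--            97, 98, 99, 100, 101, 102, 103, 104, 105, 106, 107, 108, 109,
--            110, 111, 112, 113, 114, 115, 116, 117, 118, 119, 120, 121, 122]
--
--     i = 0
--     while True:
--         if alphanumeric[i] == k:
--             break
--         i += 1
--
--         if alphanumeric[i] == '':
--             return -1
--
--     return returnVal[i]
-- ===== SOURCE B (Python) =====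
-- def custom_ord(k: str) -> int:
--     if isinstance(k, str) and len(k) == 1:
--         c = ord(k)
--         if 48 <= c <= 57 or 65 <= c <= 90 or 97 <= c <= 122:
--             return c
--     return -1
-- ===== Notes on version B (the rewrite author's own statement) =====
-- stated objective: simpler
-- what changed: Replaces the parallel lookup-table linear scan (sentinel-terminated while loop over 63 list entries) with a closed-form ord() computation guarded by three arithmetic ASCII range tests.
import Mathlib
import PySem

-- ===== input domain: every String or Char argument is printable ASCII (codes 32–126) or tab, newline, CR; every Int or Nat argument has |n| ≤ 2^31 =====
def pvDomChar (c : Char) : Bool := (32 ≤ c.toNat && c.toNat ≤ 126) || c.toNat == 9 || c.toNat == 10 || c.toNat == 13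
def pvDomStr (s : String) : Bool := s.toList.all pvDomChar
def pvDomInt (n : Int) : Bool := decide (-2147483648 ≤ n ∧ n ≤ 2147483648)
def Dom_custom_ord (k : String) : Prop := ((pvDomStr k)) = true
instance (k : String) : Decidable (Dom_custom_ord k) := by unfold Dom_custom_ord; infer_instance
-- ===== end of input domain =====

-- B replaces A's sentinel-terminated linear scan of a parallel lookup table by a
-- closed-form ord() with three arithmetic ASCII range tests (objective: simpler).


-- ===== PORT A =====
-- A's parallel lists alphanumeric/returnVal, zipped entry by entry; the trailing ''
-- sentinel of alphanumeric (whose detection makes A return -1) becomes the [] case.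
def pvTableA : List (String × Int) := [
  ("0", 48), ("1", 49), ("2", 50), ("3", 51), ("4", 52), ("5", 53), ("6", 54), ("7", 55), ("8", 56), ("9", 57),
  ("A", 65), ("B", 66), ("C", 67), ("D", 68), ("E", 69), ("F", 70), ("G", 71), ("H", 72), ("I", 73), ("J", 74),
  ("K", 75), ("L", 76), ("M", 77), ("N", 78), ("O", 79), ("P", 80), ("Q", 81), ("R", 82), ("S", 83), ("T", 84),
  ("U", 85), ("V", 86), ("W", 87), ("X", 88), ("Y", 89), ("Z", 90), ("a", 97), ("b", 98), ("c", 99), ("d", 100),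
  ("e", 101), ("f", 102), ("g", 103), ("h", 104), ("i", 105), ("j", 106), ("k", 107), ("l", 108), ("m", 109), ("n", 110),
  ("o", 111), ("p", 112), ("q", 113), ("r", 114), ("s", 115), ("t", 116), ("u", 117), ("v", 118), ("w", 119), ("x", 120),
  ("y", 121), ("z", 122)]

-- A's while loop: compare alphanumeric[i] to k; on match return returnVal[i];
-- when the '' sentinel is reached, return -1.
def pvScanA (k : String) : List (String × Int) → Int
  | [] => -1
  | (a, r) :: rest => if a == k then r else pvScanA k rest

def custom_ord (k : String) : Int := pvScanA k pvTableA

-- ===== PORT B =====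
def custom_ord_alt (k : String) : Int :=
  match k.toList with
  | [c] =>
    let n : Int := Int.ofNat c.toNat
    if (48 ≤ n ∧ n ≤ 57) ∨ (65 ≤ n ∧ n ≤ 90) ∨ (97 ≤ n ∧ n ≤ 122) then n else -1
  | _ => -1

-- ===== PRECONDITION & SPEC =====
def Spec_custom_ord (k : String) (out : Int) : Prop := out = custom_ord_alt k
instance (k : String) (out : Int) : Decidable (Spec_custom_ord k out) := by unfold Spec_custom_ord; infer_instance

-- ===== CLAIM (what is proved, stated in full; the proofs are below) =====
def Claim_equal_custom_ord : Prop := ∀ (k : String), Dom_custom_ord k → Spec_custom_ord k (custom_ord k)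

-- ===== LEMMAS AND PROOFS =====

-- every key in A's table is a single character
lemma pvTableA_keys : ∀ p ∈ pvTableA, p.1.toList.length = 1 := by decide

-- if k is not a single character, the scan falls through to -1
lemma pvScanA_not_single (k : String) (hk : k.toList.length ≠ 1) :
    ∀ t : List (String × Int), (∀ p ∈ t, p.1.toList.length = 1) → pvScanA k t = -1 := by
  intro t
  induction t with
  | nil => intro _; rfl
  | cons p rest ih =>
    intro h
    obtain ⟨a, r⟩ := p
    simp only [pvScanA]
    have ha : a.toList.length = 1 := h (a, r) (List.mem_cons_self ..)
    have hne : (a == k) = false := by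
      cases hab : a == k with
      | true => exact absurd (by rw [eq_of_beq hab] at ha; exact ha) hk
      | false => rfl
    rw [hne]
    simp only [if_neg Bool.false_ne_true]
    exact ih (fun p hp => h p (List.mem_cons_of_mem _ hp))

-- the two ports agree on every single character of code < 127
set_option maxRecDepth 8000 in
lemma single_agree : ∀ n ∈ List.range 127,
    custom_ord (String.ofList [Char.ofNat n]) = custom_ord_alt (String.ofList [Char.ofNat n]) := by
  decide

-- ===== VERDICT (by name: the statement is the Claim_ definition above) =====
theorem custom_ord_spec : Claim_equal_custom_ord := by
  intro k hdom
  unfold Spec_custom_ord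
  match hl : k.toList with
  | [c] =>
    have hc : c.toNat < 127 := by
      have := (List.all_eq_true.mp hdom) c (by rw [hl]; exact List.mem_singleton_self c)
      simp only [pvDomChar, Bool.or_eq_true, Bool.and_eq_true, decide_eq_true_eq,
        beq_iff_eq] at this
      omega
    have hk : k = String.ofList [Char.ofNat c.toNat] := by
      have : Char.ofNat c.toNat = c := Char.ofNat_toNat c
      rw [this, ← hl]
      exact (String.ofList_toList).symm
    rw [hk]
    exact single_agree c.toNat (List.mem_range.mpr hc)
  | [] =>
    have hk : k = "" := by
      have : k = String.ofList k.toList := (String.ofList_toList).symm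
      rw [hl] at this; exact this
    rw [hk]; decide
  | c :: c' :: rest =>
    have h1 : k.toList.length ≠ 1 := by rw [hl]; simp
    rw [custom_ord, pvScanA_not_single k h1 pvTableA pvTableA_keys]
    unfold custom_ord_alt
    rw [hl]
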